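-- pv_equiv track=rewrite | github.com/sm2774us/competitive_programming | String/001_leetcode_P_151_ReverseWordsInAString/Solution.py | reverseWordsWithDelimiter
-- ===== SOURCE A (Python) =====
-- def reverseWordsWithDelimiter(s: str, delimiter: str) -> str:
--     chars = [t for t in s]
--     slow, n = 0, len(s)
--     for fast in range(n):
--         if chars[fast] != delimiter or (
--             fast > 0 and chars[fast] == delimiter and chars[fast - 1] != delimiter
--         ):
--             chars[slow] = chars[fast]
--             slow += 1
--
--     if slow == 0:
--         return ""
--     chars = chars[: slow - 1] if chars[-1] == delimiter else chars[:slow]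
--     chars.reverse()
--
--     slow, m = 0, len(chars)
--     for fast in range(m + 1):
--         if fast == m or chars[fast] == delimiter:
--             chars[slow:fast] = chars[slow:fast][::-1]
--             # Reverse list, I again do it not in place, but you can easlily do it in place, as shown below:
--             # chars.reverse()
--             slow = fast + 1
--
--     return "".join(chars)
-- ===== SOURCE B (Python) =====
-- def reverseWordsWithDelimiter(s: str, delimiter: str) -> str:
--     # A only treats single-character delimiters as delimiters; for any other
--     # delimiter its per-character comparison never matches and s comes back unchanged.
--     if len(delimiter) != 1:
--         return s
--     words = [w for w in s.split(delimiter) if w]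
--     return delimiter.join(reversed(words))
-- ===== Notes on version B (the rewrite author's own statement) =====
-- stated objective: idiomatic
-- what changed: Replaces A's three in-place two-pointer array passes (compact delimiter runs, global reverse, reverse each word segment) by a single split-filter-reverse-join over the list of words; a one-line guard returns s unchanged for a delimiter that is not a single character, which is what A computes there since its per-character comparison can never match.
import Mathlib
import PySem

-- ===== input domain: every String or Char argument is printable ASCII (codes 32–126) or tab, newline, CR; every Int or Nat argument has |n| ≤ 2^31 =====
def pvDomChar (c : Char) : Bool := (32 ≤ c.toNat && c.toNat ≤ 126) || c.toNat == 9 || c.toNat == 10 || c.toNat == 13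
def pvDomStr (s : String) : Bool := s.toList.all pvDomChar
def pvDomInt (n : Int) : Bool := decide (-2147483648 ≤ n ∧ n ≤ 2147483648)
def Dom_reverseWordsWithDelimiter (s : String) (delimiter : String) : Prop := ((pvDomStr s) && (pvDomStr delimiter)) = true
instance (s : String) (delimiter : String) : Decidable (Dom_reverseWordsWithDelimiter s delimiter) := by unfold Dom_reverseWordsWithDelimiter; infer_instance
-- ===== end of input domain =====

-- ===== PORT A =====
-- the loop body of A's first pass (definitionally equal to the lambda in the port)
def stepA (D : List Char) (st : List Char × Nat) (fast : Nat) : List Char × Nat :=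
  let cs := st.1
  let slow := st.2
  let cf := cs.getD fast ' '
  if ([cf] ≠ D) ∨ (0 < fast ∧ [cf] = D ∧ [cs.getD (fast - 1) ' '] ≠ D) then
    (cs.set slow cf, slow + 1)
  else (cs, slow)

-- the loop body of A's second pass
def stepR (D : List Char) (m : Nat) (st : List Char × Nat) (fast : Nat) : List Char × Nat :=
  let cs := st.1
  let slow := st.2
  if fast = m ∨ [cs.getD fast ' '] = D then
    (cs.take slow ++ ((cs.drop slow).take (fast - slow)).reverse ++ cs.drop fast, fast + 1)
  else (cs, slow)

def reverseWordsWithDelimiter (s : String) (delimiter : String) : String :=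
  -- chars = [t for t in s]; slow, n = 0, len(s)
  let orig := s.toList
  let n := orig.length
  let D := delimiter.toList
  -- first pass: for fast in range(n): compact delimiter runs in place (body = stepA)
  let p := (List.range n).foldl (stepA D) (orig, 0)
  let slow := p.2
  if slow = 0 then ""
  else
    let cs := p.1
    -- chars[: slow - 1] if chars[-1] == delimiter else chars[:slow]
    -- (cs is nonempty here, so chars[-1] is the element at index length - 1)
    let cs := if [cs.getD (cs.length - 1) ' '] = D then cs.take (slow - 1) else cs.take slow
    -- chars.reverse()
    let cs := cs.reverse
    let m := cs.length
    -- second pass: for fast in range(m + 1): reverse each segment in place (body = stepR)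
    let q := (List.range (m + 1)).foldl (stepR D m) (cs, 0)
    -- "".join(chars)
    String.ofList q.1

-- ===== PORT B =====
def reverseWordsWithDelimiter_alt (s : String) (delimiter : String) : String :=
  if PySem.Str.len delimiter ≠ 1 then s
  else
    -- words = [w for w in s.split(delimiter) if w]   (delimiter ≠ "" here, so split? is some)
    let words := ((PySem.Str.split? s delimiter).getD []).filter (fun w => w ≠ "")
    -- delimiter.join(reversed(words))
    PySem.Str.join delimiter words.reverse

-- ===== PRECONDITION & SPEC =====
def Spec_reverseWordsWithDelimiter (s : String) (delimiter : String) (out : String) : Prop := out = reverseWordsWithDelimiter_alt s delimiter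
instance (s : String) (delimiter : String) (out : String) : Decidable (Spec_reverseWordsWithDelimiter s delimiter out) := by unfold Spec_reverseWordsWithDelimiter; infer_instance

-- ===== CLAIM (what is proved, stated in full; the proofs are below) =====
def Claim_equal_reverseWordsWithDelimiter : Prop := ∀ (s : String) (delimiter : String), Dom_reverseWordsWithDelimiter s delimiter → Spec_reverseWordsWithDelimiter s delimiter (reverseWordsWithDelimiter s delimiter)

-- ===== LEMMAS AND PROOFS =====


-- ---------- proof-side helper definitions ----------

-- keep-decision of A's first pass, with `prev` the previous ORIGINAL character
def keepc (D : List Char) (c : Char) (prev : Option Char) : Bool :=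
  decide ([c] ≠ D) ||
    (match prev with
     | some p => decide ([c] = D) && decide ([p] ≠ D)
     | none => false)

-- functional form of A's compaction pass
def compA (D : List Char) : Option Char → List Char → List Char
  | _, [] => []
  | prev, c :: t => if keepc D c prev then c :: compA D (some c) t else compA D (some c) t

-- recursive form of str.split on a single-character separator (empty pieces kept)
def mySplit (d : Char) : List Char → List (List Char)
  | [] => [[]]
  | c :: t =>
      if c = d then [] :: mySplit d t
      else
        match mySplit d t with
        | [] => [[c]]
        | y :: ys => (c :: y) :: ys

-- the nonempty pieces: exactly B's filtered word list
def wordsD (d : Char) (l : List Char) : List (List Char) := (mySplit d l).filter (· ≠ [])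

def consHead (x : List Char) : List (List Char) → List (List Char)
  | [] => [x]
  | y :: ys => (x ++ y) :: ys

-- functional form of A's second pass: reverse every d-separated segment
def procRev (d : Char) (l : List Char) : List Char :=
  match hm : l.dropWhile (· ≠ d) with
  | [] => (l.takeWhile (· ≠ d)).reverse
  | _ :: t => (l.takeWhile (· ≠ d)).reverse ++ d :: procRev d t
termination_by l.length
decreasing_by
  have h1 := List.length_dropWhile_le (· ≠ d) l
  rw [hm] at h1
  simp at h1
  omega

-- ---------- generic list facts ----------

theorem getD_append_right (l1 l2 : List Char) (i : Nat) (c : Char) (h : l1.length ≤ i) :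
    (l1 ++ l2).getD i c = l2.getD (i - l1.length) c := by
  simp [List.getD, List.getElem?_append_right h]

theorem getD_append_left (l1 l2 : List Char) (i : Nat) (c : Char) (h : i < l1.length) :
    (l1 ++ l2).getD i c = l1.getD i c := by
  simp [List.getD, List.getElem?_append_left h]

theorem getD_drop (l : List Char) (k i : Nat) (c : Char) :
    (l.drop k).getD i c = l.getD (k + i) c := by
  simp [List.getD]

theorem getD_eq_getElem (l : List Char) (i : Nat) (c : Char) (h : i < l.length) :
    l.getD i c = l[i] := by
  simp [List.getD, List.getElem?_eq_getElem h]

theorem take_succ_getElem (l : List Char) (i : Nat) (h : i < l.length) :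
    l.take (i + 1) = l.take i ++ [l[i]] := by
  induction l generalizing i with
  | nil => simp at h
  | cons a t ih =>
    cases i with
    | zero => simp
    | succ j => simp only [List.take_succ_cons, List.getElem_cons_succ, ih j (by simpa using h)]; rfl

theorem intercalate_cons_cons (d : Char) (x y : List Char) (ys : List (List Char)) :
    List.intercalate [d] (x :: y :: ys) = x ++ [d] ++ List.intercalate [d] (y :: ys) := by
  simp [List.intercalate, List.intersperse]

theorem intercalate_singleton (d : Char) (x : List Char) :
    List.intercalate [d] [x] = x := by
  simp [List.intercalate]

theorem intercalate_append_singleton (d : Char) (zs : List (List Char)) (x : List Char)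
    (h : zs ≠ []) :
    List.intercalate [d] (zs ++ [x]) = List.intercalate [d] zs ++ [d] ++ x := by
  induction zs with
  | nil => exact absurd rfl h
  | cons z t ih =>
    cases t with
    | nil => rw [List.singleton_append, intercalate_cons_cons, intercalate_singleton, intercalate_singleton]
    | cons y u =>
      rw [List.cons_append, List.cons_append, intercalate_cons_cons, ← List.cons_append,
        ih (by simp), intercalate_cons_cons]
      simp

theorem intercalate_ne_nil (d : Char) (ws : List (List Char)) (h : ws ≠ [])
    (hw : ∀ w ∈ ws, w ≠ []) : List.intercalate [d] ws ≠ [] := by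
  match ws with
  | [] => exact absurd rfl h
  | [w] => simpa [intercalate_singleton] using hw w (by simp)
  | w :: y :: ys => rw [intercalate_cons_cons]; simp

theorem reverse_intercalate (d : Char) (ws : List (List Char)) :
    (List.intercalate [d] ws).reverse = List.intercalate [d] (ws.reverse.map List.reverse) := by
  induction ws with
  | nil => simp [List.intercalate]
  | cons w t ih =>
    cases t with
    | nil => simp [intercalate_singleton]
    | cons y u =>
      rw [intercalate_cons_cons]
      have hne : ((y :: u).reverse.map List.reverse) ≠ [] := by simp
      rw [show ((w :: y :: u).reverse.map List.reverse) = ((y :: u).reverse.map List.reverse) ++ [w.reverse] by simp]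
      rw [intercalate_append_singleton _ _ _ hne, ← ih]
      simp

theorem dropWhile_head_eq (q : Char → Bool) (l t : List Char) (c : Char)
    (h : l.dropWhile q = c :: t) : q c = false := by
  induction l with
  | nil => simp at h
  | cons a t' ih =>
    rw [List.dropWhile_cons] at h
    by_cases ha : q a = true
    · rw [if_pos ha] at h; exact ih h
    · rw [if_neg ha] at h
      cases h
      simpa using ha

theorem takeWhile_append_of_mem (d : Char) (p s : List Char) (h : d ∈ p) :
    (p ++ s).takeWhile (· ≠ d) = p.takeWhile (· ≠ d) := by
  induction p with
  | nil => simp at h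
  | cons a t ih =>
    by_cases ha : a = d
    · subst ha; simp [List.takeWhile_cons]
    · have hd : d ∈ t := by
        rcases List.mem_cons.mp h with h' | h'
        · exact absurd h'.symm ha
        · exact h'
      rw [List.cons_append, List.takeWhile_cons, List.takeWhile_cons, ih hd]

theorem dropWhile_append_of_mem (d : Char) (p s : List Char) (h : d ∈ p) :
    (p ++ s).dropWhile (· ≠ d) = p.dropWhile (· ≠ d) ++ s := by
  induction p with
  | nil => simp at h
  | cons a t ih =>
    by_cases ha : a = d
    · subst ha; simp [List.dropWhile_cons]
    · have hd : d ∈ t := by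
        rcases List.mem_cons.mp h with h' | h'
        · exact absurd h'.symm ha
        · exact h'
      rw [List.cons_append, List.dropWhile_cons, List.dropWhile_cons, ih hd]
      split <;> simp

theorem takeWhile_of_free (d : Char) (w : List Char) (h : ∀ x ∈ w, x ≠ d) :
    w.takeWhile (· ≠ d) = w :=
  List.takeWhile_eq_self_iff.mpr (fun x hx => by simp [h x hx])

theorem dropWhile_of_free (d : Char) (w : List Char) (h : ∀ x ∈ w, x ≠ d) :
    w.dropWhile (· ≠ d) = [] :=
  List.dropWhile_eq_nil_iff.mpr (fun x hx => by simp [h x hx])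

theorem takeWhile_dropWhile_recombine (d : Char) (l : List Char) :
    l.takeWhile (· ≠ d) ++ l.dropWhile (· ≠ d) = l :=
  List.takeWhile_append_dropWhile

-- ---------- compA: A's first pass ----------

theorem compA_sublist (D : List Char) (prev : Option Char) (l : List Char) :
    List.Sublist (compA D prev l) l := by
  induction l generalizing prev with
  | nil => simp [compA]
  | cons c t ih =>
    rw [compA]
    split
    · exact (ih (some c)).cons₂ c
    · exact (ih (some c)).cons c

theorem compA_length_le (D : List Char) (prev : Option Char) (l : List Char) :
    (compA D prev l).length ≤ l.length :=
  (compA_sublist D prev l).length_le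

theorem compA_eq_of_length (D : List Char) (prev : Option Char) (l : List Char)
    (h : (compA D prev l).length = l.length) : compA D prev l = l :=
  (compA_sublist D prev l).eq_of_length h

theorem compA_append_one (D : List Char) (l : List Char) (c : Char) : ∀ prev,
    compA D prev (l ++ [c]) =
      compA D prev l ++ (if keepc D c (l.getLast?.or prev) then [c] else []) := by
  induction l with
  | nil =>
    intro prev
    by_cases hk : keepc D c prev <;> simp [compA, hk]
  | cons a t ih =>
    intro prev
    simp only [List.cons_append, compA]
    rw [ih (some a)]
    have hlast : (a :: t).getLast?.or prev = t.getLast?.or (some a) := by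
      cases t with
      | nil => simp
      | cons b u => simp [List.getLast?_cons]
    rw [hlast]
    split <;> simp

theorem stepA_spec (D orig : List Char) (i : Nat) (hilt : i < orig.length) :
    stepA D (compA D none (orig.take i) ++ orig.drop (compA D none (orig.take i)).length,
             (compA D none (orig.take i)).length) i =
      (compA D none (orig.take (i + 1)) ++ orig.drop (compA D none (orig.take (i + 1))).length,
       (compA D none (orig.take (i + 1))).length) := by
  have htake : orig.take (i + 1) = orig.take i ++ [orig[i]] := take_succ_getElem orig i hilt
  have hC1 : compA D none (orig.take (i + 1)) =
      compA D none (orig.take i) ++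
        (if keepc D orig[i] ((orig.take i).getLast?) then [orig[i]] else []) := by
    rw [htake, compA_append_one D (orig.take i) orig[i] none, Option.or_none]
  set C := compA D none (orig.take i) with hC
  set k := C.length with hk
  have hkle : k ≤ i :=
    le_trans (compA_length_le D none (orig.take i)) (by simp)
  have him1 : i - 1 < orig.length := by omega
  have hgeti : (C ++ orig.drop k).getD i ' ' = orig[i] := by
    rw [getD_append_right C _ i ' ' (by omega), getD_drop,
      Nat.add_sub_cancel' hkle, getD_eq_getElem orig i ' ' hilt]
  have hgetprev : (C ++ orig.drop k).getD (i - 1) ' ' = orig[i - 1] := by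
    by_cases hki : k ≤ i - 1
    · rw [getD_append_right C _ (i - 1) ' ' (by omega), getD_drop,
        Nat.add_sub_cancel' hki, getD_eq_getElem orig (i - 1) ' ' him1]
    · have hki2 : k = i := by omega
      have hi0 : 0 < i := by omega
      have hCfull : C = orig.take i := by
        apply compA_eq_of_length
        rw [← hC, ← hk, hki2, List.length_take, Nat.min_eq_left (by omega)]
      have hlen : i - 1 < C.length := by omega
      rw [getD_append_left C _ (i - 1) ' ' hlen, hCfull,
        getD_eq_getElem _ (i - 1) ' ' (by rw [← hCfull]; exact hlen)]
      simp [List.getElem_take]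
  have hlast : (orig.take i).getLast? = if i = 0 then none else some orig[i - 1] := by
    by_cases hi0 : i = 0
    · simp [hi0]
    · rw [if_neg hi0, List.getLast?_eq_getElem?, List.length_take,
        Nat.min_eq_left (by omega), List.getElem?_take]
      rw [if_pos (by omega), List.getElem?_eq_getElem him1]
  rw [stepA]
  simp only [hgeti, hgetprev]
  by_cases hkeep : ([orig[i]] ≠ D) ∨ (0 < i ∧ [orig[i]] = D ∧ [orig[i - 1]] ≠ D)
  · rw [if_pos hkeep]
    have hkc : keepc D orig[i] ((orig.take i).getLast?) = true := by
      rw [hlast]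
      rcases hkeep with h | ⟨hpos, h1, h2⟩
      · by_cases hi0 : i = 0
        · subst hi0; simp [keepc, h]
        · simp [hi0, keepc, h]
      · have hi0 : ¬ i = 0 := by omega
        simp [hi0, keepc, h1, h2]
    have hdropk : orig.drop k = orig[k] :: orig.drop (k + 1) :=
      List.drop_eq_getElem_cons (by omega)
    have hset : (C ++ orig.drop k).set k orig[i] = (C ++ [orig[i]]) ++ orig.drop (k + 1) := by
      rw [List.set_append, if_neg (by omega)]
      simp only [← hk, Nat.sub_self]
      rw [hdropk, List.set_cons_zero]
      simp
    rw [hC1, hkc]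
    simp only [if_pos rfl]
    rw [hset]
    simp [hk]
  · rw [if_neg hkeep]
    have hkc : keepc D orig[i] ((orig.take i).getLast?) = false := by
      rw [hlast]
      push_neg at hkeep
      obtain ⟨h1, h2⟩ := hkeep
      by_cases hi0 : i = 0
      · subst hi0; simp [keepc, h1]
      · simp [hi0, keepc, h1, h2 (by omega) h1]
    rw [hC1, hkc]
    simp [hk]

theorem loop1_spec (D orig : List Char) : ∀ i, i ≤ orig.length →
    (List.range i).foldl (stepA D) (orig, 0) =
      (compA D none (orig.take i) ++ orig.drop (compA D none (orig.take i)).length,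
       (compA D none (orig.take i)).length) := by
  intro i
  induction i with
  | zero =>
    intro _
    simp [compA]
  | succ i ih =>
    intro hi
    rw [List.range_succ, List.foldl_append, ih (by omega)]
    simp only [List.foldl_cons, List.foldl_nil]
    exact stepA_spec D orig i (by omega)

theorem compA_all (D : List Char) (h : ∀ c : Char, [c] ≠ D) : ∀ prev l, compA D prev l = l := by
  intro prev l
  induction l generalizing prev with
  | nil => rfl
  | cons c t ih =>
    rw [compA, if_pos, ih]
    simp [keepc, h c]

-- ---------- compA on a single-character delimiter ----------

theorem compA_some_d (d : Char) (l : List Char) :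
    compA [d] (some d) l = compA [d] none l := by
  cases l with
  | nil => rfl
  | cons c t =>
    rw [compA, compA]
    have : keepc [d] c (some d) = keepc [d] c none := by
      simp [keepc]
    rw [this]

theorem compA_cons (d : Char) (c : Char) (t : List Char) :
    compA [d] none (c :: t) =
      if c = d then compA [d] none t else c :: compA [d] (some c) t := by
  by_cases hc : c = d
  · subst hc
    rw [compA, if_neg, compA_some_d, if_pos rfl]
    simp [keepc]
  · rw [compA, if_pos, if_neg hc]
    simp [keepc, hc]

theorem compA_some_ne (d : Char) (t : List Char) : ∀ p, p ≠ d →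
    compA [d] (some p) t =
      t.takeWhile (· ≠ d) ++
        (match t.dropWhile (· ≠ d) with
         | [] => []
         | _ :: t' => d :: compA [d] none t') := by
  induction t with
  | nil => intro p hp; simp [compA]
  | cons c t' ih =>
    intro p hp
    rw [compA, if_pos (by simp [keepc, hp])]
    by_cases hc : c = d
    · subst hc
      rw [compA_some_d]
      simp [List.takeWhile_cons, List.dropWhile_cons]
    · rw [ih c hc]
      simp [List.takeWhile_cons, List.dropWhile_cons, hc]

-- ---------- mySplit and wordsD ----------

theorem mySplit_ne_nil (d : Char) (l : List Char) : mySplit d l ≠ [] := by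
  cases l with
  | nil => simp [mySplit]
  | cons c t =>
    rw [mySplit]
    by_cases hc : c = d
    · simp [hc]
    · rcases hms : mySplit d t with _ | ⟨y, ys⟩ <;> simp [hc, hms]

theorem mySplit_eq (d : Char) (l : List Char) :
    mySplit d l =
      l.takeWhile (· ≠ d) ::
        (match l.dropWhile (· ≠ d) with
         | [] => []
         | _ :: t => mySplit d t) := by
  induction l with
  | nil => rfl
  | cons c t ih =>
    by_cases hc : c = d
    · subst hc
      rw [mySplit]
      simp [List.takeWhile_cons, List.dropWhile_cons]
    · rw [mySplit, if_neg hc, ih]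
      simp [List.takeWhile_cons, List.dropWhile_cons, hc]

theorem consHead_nil (ys : List (List Char)) (h : ys ≠ []) : consHead [] ys = ys := by
  cases ys with
  | nil => exact absurd rfl h
  | cons y t => simp [consHead]

theorem splitOn_go_eq (d : Char) : ∀ fuel l cur acc, l.length < fuel →
    PySem.Chars.splitOn.go [d] fuel l cur acc =
      acc.reverse ++ consHead cur.reverse (mySplit d l) := by
  intro fuel
  induction fuel with
  | zero => intro l cur acc h; omega
  | succ fuel ih =>
    intro l cur acc h
    cases l with
    | nil =>
      rw [PySem.Chars.splitOn.go]
      · rw [mySplit]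
        simp [consHead]
      · omega
    | cons c rest =>
      rw [PySem.Chars.splitOn.go]
      have hpre : [d].isPrefixOf (c :: rest) = (d == c) := by
        simp [List.isPrefixOf]
      by_cases hc : c = d
      · subst hc
        rw [if_pos (by simp [hpre])]
        simp only [List.length_singleton, List.drop_succ_cons, List.drop_zero, List.reverse_nil]
        rw [ih _ _ _ (by simp at h; omega)]
        rw [mySplit, if_pos rfl]
        rcases hms2 : mySplit c rest with _ | ⟨y, ys⟩
        · exact absurd hms2 (mySplit_ne_nil c rest)
        · simp [consHead]
      · rw [if_neg (by simp [hpre, Ne.symm hc])]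
        rw [ih _ _ _ (by simpa using h)]
        rw [mySplit, if_neg hc]
        rcases hms : mySplit d rest with _ | ⟨y, ys⟩
        · exact absurd hms (mySplit_ne_nil d rest)
        · simp [consHead]

theorem splitOn_eq_mySplit (d : Char) (l : List Char) :
    PySem.Chars.splitOn l [d] = mySplit d l := by
  unfold PySem.Chars.splitOn
  rw [splitOn_go_eq d (l.length + 1) l [] [] (Nat.lt_succ_self _)]
  simp [consHead_nil _ (mySplit_ne_nil d l)]

theorem mem_mySplit_not_mem (d : Char) (l w : List Char) (h : w ∈ mySplit d l) : d ∉ w := by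
  induction l generalizing w with
  | nil =>
    rw [mySplit] at h
    simp at h
    simp [h]
  | cons c t ih =>
    rw [mySplit] at h
    by_cases hc : c = d
    · rw [if_pos hc] at h
      rcases List.mem_cons.mp h with h' | h'
      · simp [h']
      · exact ih _ h'
    · rw [if_neg hc] at h
      rcases hms : mySplit d t with _ | ⟨y, ys⟩
      · exact absurd hms (mySplit_ne_nil d t)
      · rw [hms] at h
        rcases List.mem_cons.mp h with h' | h'
        · subst h'
          intro hmem
          rcases List.mem_cons.mp hmem with h2 | h2
          · exact hc h2.symm
          · exact ih y (by rw [hms]; exact List.mem_cons_self) h2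
        · exact ih w (by rw [hms]; exact List.mem_cons_of_mem _ h')

theorem wordsD_free (d : Char) (l w : List Char) (h : w ∈ wordsD d l) : w ≠ [] ∧ d ∉ w := by
  unfold wordsD at h
  rcases List.mem_filter.mp h with ⟨h1, h2⟩
  exact ⟨by simpa using h2, mem_mySplit_not_mem d l w h1⟩

theorem wordsD_nil_iff (d : Char) (l : List Char) :
    wordsD d l = [] ↔ ∀ x ∈ l, x = d := by
  induction l with
  | nil => simp [wordsD, mySplit]
  | cons c t ih =>
    by_cases hc : c = d
    · subst hc
      rw [wordsD, mySplit, if_pos rfl]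
      simpa [wordsD] using ih
    · rcases hms : mySplit d t with _ | ⟨y, ys⟩
      · exact absurd hms (mySplit_ne_nil d t)
      · rw [wordsD, mySplit, if_neg hc, hms]
        simp [Ne.symm hc, hc]

theorem allD_getLast (d : Char) (t : List Char) (h : ∀ x ∈ t, x = d) :
    (d :: t).getLast? = some d := by
  induction t with
  | nil => simp
  | cons a u ih =>
    rw [List.getLast?_cons_cons]
    have ha : a = d := h a (by simp)
    subst ha
    exact ih (fun x hx => h x (by simp [hx]))

-- the compacted array is the single-delimiter join of the words, plus one
-- trailing delimiter exactly when the input ended with the delimiter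
theorem compA_characterization (d : Char) (l : List Char) :
    compA [d] none l =
      List.intercalate [d] (wordsD d l) ++
        (if l.getLast? = some d ∧ wordsD d l ≠ [] then [d] else []) := by
  suffices H : ∀ n (l : List Char), l.length ≤ n →
      compA [d] none l =
        List.intercalate [d] (wordsD d l) ++
          (if l.getLast? = some d ∧ wordsD d l ≠ [] then [d] else []) from
    H l.length l le_rfl
  intro n
  induction n with
  | zero =>
    intro l hl
    have h0 : l = [] := List.length_eq_zero_iff.mp (Nat.le_zero.mp hl)
    subst h0
    simp [compA, wordsD, mySplit, List.intercalate]
  | succ n ih =>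
    intro l hl
    cases l with
    | nil => simp [compA, wordsD, mySplit, List.intercalate]
    | cons c t =>
      by_cases hc : c = d
      · rw [hc]
        rw [compA_cons, if_pos rfl]
        have hw : wordsD d (d :: t) = wordsD d t := by
          simp [wordsD, mySplit]
        rw [hw]
        cases t with
        | nil => simp [compA, wordsD, mySplit, List.intercalate]
        | cons b u =>
          rw [ih (b :: u) (by simp at hl ⊢; omega), List.getLast?_cons_cons]
      · rw [compA_cons, if_neg hc, compA_some_ne d t c hc]
        rcases hdw : t.dropWhile (· ≠ d) with _ | ⟨e, t'⟩
        · have hfree : ∀ x ∈ t, x ≠ d := fun x hx => by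
            have h1 := List.dropWhile_eq_nil_iff.mp hdw x hx
            simpa using h1
          have htw : t.takeWhile (· ≠ d) = t := takeWhile_of_free d t hfree
          have hms : mySplit d t = [t] := by
            rw [mySplit_eq d t, hdw, htw]
          have hwc : wordsD d (c :: t) = [c :: t] := by
            simp [wordsD, mySplit, hc, hms]
          have hlastne : ¬ (c :: t).getLast? = some d := by
            intro hcon
            rcases List.mem_cons.mp (List.mem_of_getLast? hcon) with h1 | h1
            · exact hc h1.symm
            · exact hfree d h1 rfl
          rw [hwc, htw]
          simp [intercalate_singleton, hlastne]
        · have he : e = d := by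
            simpa using dropWhile_head_eq (fun x => decide (x ≠ d)) t t' e hdw
          rw [he] at hdw
          have hrec := takeWhile_dropWhile_recombine d t
          rw [hdw] at hrec
          have hlt : t'.length ≤ n := by
            have h1 := List.length_dropWhile_le (fun x => decide (x ≠ d)) t
            rw [hdw] at h1
            simp at h1 hl
            omega
          have hms : mySplit d t = t.takeWhile (· ≠ d) :: mySplit d t' := by
            rw [mySplit_eq d t, hdw]
          have hwc : wordsD d (c :: t) = (c :: t.takeWhile (· ≠ d)) :: wordsD d t' := by
            simp [wordsD, mySplit, hc, hms]
          have hsplitct : c :: t = (c :: t.takeWhile (· ≠ d)) ++ d :: t' := by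
            conv_lhs => rw [← hrec]
            simp
          have hmatch : (match e :: t' with
              | [] => ([] : List Char)
              | _ :: t' => d :: compA [d] none t') = d :: compA [d] none t' := rfl
          rw [hmatch, ih t' hlt, hwc]
          by_cases hW : wordsD d t' = []
          · have hall : ∀ x ∈ t', x = d := (wordsD_nil_iff d t').mp hW
            have hlast : (c :: t).getLast? = some d := by
              rw [hsplitct, List.getLast?_append, allD_getLast d t' hall]
              rfl
            rw [hW, hlast]
            simp [intercalate_singleton, List.intercalate]
          · have ht' : t' ≠ [] := by
              intro h0
              rw [h0] at hW
              exact hW (by simp [wordsD, mySplit])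
            have hlast2 : (c :: t).getLast? = t'.getLast? := by
              rw [hsplitct, List.getLast?_append]
              have h2 : (d :: t').getLast? = t'.getLast? := by
                cases t' with
                | nil => exact absurd rfl ht'
                | cons a u => exact List.getLast?_cons_cons
              rw [h2]
              rcases ht'' : t'.getLast? with _ | y
              · exact absurd (List.getLast?_eq_none_iff.mp ht'') ht'
              · rfl
            rcases hWc : wordsD d t' with _ | ⟨w, ws⟩
            · exact absurd hWc hW
            · rw [intercalate_cons_cons, hlast2]
              simp

-- ---------- procRev: A's second pass ----------

theorem procRev_eq_nil_case (d : Char) (l : List Char) (h : l.dropWhile (· ≠ d) = []) :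
    procRev d l = (l.takeWhile (· ≠ d)).reverse := by
  rw [procRev]
  split
  · rfl
  · rename_i e t heq
    rw [h] at heq
    cases heq

theorem procRev_eq_cons (d : Char) (l t : List Char) (e : Char)
    (h : l.dropWhile (· ≠ d) = e :: t) :
    procRev d l = (l.takeWhile (· ≠ d)).reverse ++ d :: procRev d t := by
  rw [procRev]
  split
  · rename_i heq
    rw [h] at heq
    cases heq
  · rename_i e' t' heq
    rw [h] at heq
    injection heq with h1 h2
    rw [h2]

theorem procRev_word_d (d : Char) (w r : List Char) (h : ∀ x ∈ w, x ≠ d) :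
    procRev d (w ++ d :: r) = w.reverse ++ d :: procRev d r := by
  have h1 : (w ++ d :: r).dropWhile (· ≠ d) = d :: r := by
    rw [List.dropWhile_append, dropWhile_of_free d w h]
    simp [List.dropWhile_cons]
  have h2 : (w ++ d :: r).takeWhile (· ≠ d) = w := by
    rw [List.takeWhile_append, takeWhile_of_free d w h]
    simp [List.takeWhile_cons]
  rw [procRev_eq_cons d _ r d h1, h2]

theorem procRev_nil (d : Char) : procRev d [] = [] := by
  rw [procRev_eq_nil_case d [] (by simp)]
  simp

theorem procRev_free (d : Char) (w : List Char) (h : ∀ x ∈ w, x ≠ d) :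
    procRev d w = w.reverse := by
  rw [procRev_eq_nil_case d w (dropWhile_of_free d w h), takeWhile_of_free d w h]

theorem procRev_length (d : Char) (l : List Char) : (procRev d l).length = l.length := by
  suffices H : ∀ n (l : List Char), l.length ≤ n → (procRev d l).length = l.length from
    H l.length l le_rfl
  intro n
  induction n with
  | zero =>
    intro l hl
    have : l = [] := List.length_eq_zero_iff.mp (Nat.le_zero.mp hl)
    subst this
    rw [procRev_nil]
  | succ n ih =>
    intro l hl
    rcases hdw : l.dropWhile (· ≠ d) with _ | ⟨e, t⟩
    · rw [procRev_eq_nil_case d l hdw]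
      have h2 := takeWhile_dropWhile_recombine d l
      rw [hdw, List.append_nil] at h2
      rw [List.length_reverse, h2]
    · have hrec := takeWhile_dropWhile_recombine d l
      rw [hdw] at hrec
      have hlt : t.length < l.length := by
        have h1 := List.length_dropWhile_le (fun x => decide (x ≠ d)) l
        rw [hdw] at h1
        simpa using h1
      rw [procRev_eq_cons d l t e hdw]
      conv_rhs => rw [← hrec]
      simp [ih t (by omega)]

theorem procRev_append_boundary (d : Char) : ∀ p s : List Char,
    (p = [] ∨ p.getLast? = some d) →
    procRev d (p ++ s) = procRev d p ++ procRev d s := by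
  suffices H : ∀ n (p s : List Char), p.length ≤ n → (p = [] ∨ p.getLast? = some d) →
      procRev d (p ++ s) = procRev d p ++ procRev d s by
    intro p s hp
    exact H p.length p s le_rfl hp
  intro n
  induction n with
  | zero =>
    intro p s hl _
    have : p = [] := List.length_eq_zero_iff.mp (Nat.le_zero.mp hl)
    subst this
    simp [procRev_nil]
  | succ n ih =>
    intro p s hl hp
    rcases hp with hp | hp
    · subst hp
      simp [procRev_nil]
    · have hdmem : d ∈ p := List.mem_of_getLast? hp
      rcases hdwe : p.dropWhile (· ≠ d) with _ | ⟨e, t⟩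
      · exact absurd (List.dropWhile_eq_nil_iff.mp hdwe d hdmem) (by simp)
      · have he : e = d := by
          have h1 := dropWhile_head_eq (fun x => decide (x ≠ d)) p t e hdwe
          simpa using h1
        rw [he] at hdwe
        have hrec := takeWhile_dropWhile_recombine d p
        rw [hdwe] at hrec
        have hlt : t.length < p.length := by
          have h1 := List.length_dropWhile_le (fun x => decide (x ≠ d)) p
          rw [hdwe] at h1
          simpa using h1
        have ht : t = [] ∨ t.getLast? = some d := by
          rcases ht0 : t with _ | ⟨a, u⟩
          · exact Or.inl rfl
          · right
            rw [← hrec, ht0] at hp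
            rw [List.getLast?_append, List.getLast?_cons_cons] at hp
            cases hlast : (a :: u).getLast? with
            | none => rw [hlast] at hp; simp at hp; simp [List.getLast?_cons] at hlast
            | some b => rw [hlast] at hp; simp at hp; rw [hp]
        rw [procRev_eq_cons d (p ++ s) (t ++ s) d
              (by rw [dropWhile_append_of_mem d p s hdmem, hdwe]; rfl),
            takeWhile_append_of_mem d p s hdmem,
            procRev_eq_cons d p t d hdwe,
            ih t s (by omega) ht]
        simp

theorem procRev_intercalate (d : Char) (ws : List (List Char))
    (h : ∀ w ∈ ws, ∀ x ∈ w, x ≠ d) :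
    procRev d (List.intercalate [d] ws) = List.intercalate [d] (ws.map List.reverse) := by
  induction ws with
  | nil =>
    simp [List.intercalate, procRev_nil]
  | cons w t ih =>
    cases t with
    | nil =>
      simp only [List.map_cons, List.map_nil, intercalate_singleton]
      exact procRev_free d w (h w (by simp))
    | cons y u =>
      rw [intercalate_cons_cons,
        show w ++ [d] ++ List.intercalate [d] (y :: u) =
          w ++ d :: List.intercalate [d] (y :: u) by simp,
        procRev_word_d d w _ (h w (by simp)),
        ih (fun v hv x hx => h v (by simp [hv]) x hx)]
      simp only [List.map_cons, intercalate_cons_cons]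
      simp

theorem loop2_inv (d : Char) (R : List Char) : ∀ i, i ≤ R.length →
    ∃ slow, slow ≤ i ∧
      (List.range i).foldl (stepR [d] R.length) (R, 0) =
        (procRev d (R.take slow) ++ R.drop slow, slow) ∧
      (slow = 0 ∨ (R.take slow).getLast? = some d) ∧
      (∀ j, slow ≤ j → j < i → R.getD j ' ' ≠ d) := by
  intro i
  induction i with
  | zero =>
    intro _
    exact ⟨0, le_rfl, by simp [procRev_nil], Or.inl rfl, by omega⟩
  | succ i ih =>
    intro hi
    obtain ⟨slow, hsl, hfold, hbound, hnod⟩ := ih (by omega)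
    have hilt : i < R.length := by omega
    have hslen : (R.take slow).length = slow := by
      rw [List.length_take]
      omega
    have hPlen : (procRev d (R.take slow)).length = slow := by
      rw [procRev_length, hslen]
    have hbound2 : R.take slow = [] ∨ (R.take slow).getLast? = some d := by
      rcases hbound with h | h
      · left; rw [h]; simp
      · right; exact h
    rw [List.range_succ, List.foldl_append, hfold]
    simp only [List.foldl_cons, List.foldl_nil]
    have hread : (procRev d (R.take slow) ++ R.drop slow).getD i ' ' = R.getD i ' ' := by
      rw [getD_append_right _ _ i ' ' (by omega), hPlen, getD_drop,
        Nat.add_sub_cancel' (by omega : slow ≤ i)]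
    simp only [stepR]
    by_cases hdel : R.getD i ' ' = d
    · rw [if_pos (Or.inr (by rw [hread, hdel]))]
      have htakeslow : (procRev d (R.take slow) ++ R.drop slow).take slow =
          procRev d (R.take slow) := List.take_left' hPlen
      have hdropslow : (procRev d (R.take slow) ++ R.drop slow).drop slow = R.drop slow :=
        List.drop_left' hPlen
      have hdropi : (procRev d (R.take slow) ++ R.drop slow).drop i = R.drop i := by
        rw [List.drop_append, hPlen,
          List.drop_eq_nil_of_le (by rw [hPlen]; omega), List.nil_append, List.drop_drop]
        congr 1
        omega
      have hRi : R[i] = d := by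
        rw [← getD_eq_getElem R i ' ' hilt]
        exact hdel
      have hfreew : ∀ x ∈ (R.drop slow).take (i - slow), x ≠ d := by
        intro x hx
        obtain ⟨j, hjm, hjx⟩ := List.mem_take_iff_getElem.mp hx
        have hjlt : j < i - slow := lt_of_lt_of_le hjm (min_le_left _ _)
        have hjR : slow + j < R.length := by omega
        have : x = R[slow + j] := by
          rw [← hjx, List.getElem_drop]
        rw [this]
        intro hxd
        apply hnod (slow + j) (by omega) (by omega)
        rw [getD_eq_getElem R (slow + j) ' ' hjR]
        exact hxd
      have hRtake : R.take (i + 1) = R.take slow ++ ((R.drop slow).take (i - slow) ++ [d]) := by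
        rw [show i + 1 = slow + (i + 1 - slow) by omega, List.take_add]
        congr 1
        rw [show i + 1 - slow = (i - slow) + 1 by omega,
          take_succ_getElem (R.drop slow) (i - slow) (by rw [List.length_drop]; omega)]
        congr 2
        rw [List.getElem_drop]
        simp only [show slow + (i - slow) = i from by omega]
        exact hRi
      have hproc : procRev d (R.take (i + 1)) =
          procRev d (R.take slow) ++ ((R.drop slow).take (i - slow)).reverse ++ [d] := by
        rw [hRtake, procRev_append_boundary d (R.take slow) _ hbound2]
        rw [show (R.drop slow).take (i - slow) ++ [d] = (R.drop slow).take (i - slow) ++ d :: [] from rfl,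
          procRev_word_d d _ [] hfreew, procRev_nil]
        simp
      have hRdropi : R.drop i = d :: R.drop (i + 1) := by
        rw [List.drop_eq_getElem_cons hilt, hRi]
      refine ⟨i + 1, le_rfl, ?_, ?_, by omega⟩
      · rw [htakeslow, hdropslow, hdropi, hproc, hRdropi]
        simp
      · right
        rw [hRtake, List.getLast?_append, List.getLast?_append]
        simp
    · have hne : ¬ (i = R.length ∨ [(procRev d (R.take slow) ++ R.drop slow).getD i ' '] = [d]) := by
        rintro (h1 | h1)
        · omega
        · rw [hread] at h1
          exact hdel (by simpa using h1)
      rw [if_neg hne]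
      refine ⟨slow, by omega, rfl, hbound, ?_⟩
      intro j hj1 hj2
      by_cases hji : j = i
      · rw [hji]; exact hdel
      · exact hnod j hj1 (by omega)

theorem loop2_full (d : Char) (R : List Char) :
    ((List.range (R.length + 1)).foldl (stepR [d] R.length) (R, 0)).1 = procRev d R := by
  obtain ⟨slow, hsl, hfold, hbound, hnod⟩ := loop2_inv d R R.length le_rfl
  have hslen : (R.take slow).length = slow := by
    rw [List.length_take]
    omega
  have hPlen : (procRev d (R.take slow)).length = slow := by
    rw [procRev_length, hslen]
  have hbound2 : R.take slow = [] ∨ (R.take slow).getLast? = some d := by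
    rcases hbound with h | h
    · left; rw [h]; simp
    · right; exact h
  rw [List.range_succ, List.foldl_append, hfold]
  simp only [List.foldl_cons, List.foldl_nil]
  simp only [stepR]
  rw [if_pos (Or.inl trivial)]
  have htakeslow : (procRev d (R.take slow) ++ R.drop slow).take slow =
      procRev d (R.take slow) := List.take_left' hPlen
  have hdropslow : (procRev d (R.take slow) ++ R.drop slow).drop slow = R.drop slow :=
    List.drop_left' hPlen
  have hdropm : (procRev d (R.take slow) ++ R.drop slow).drop R.length = [] := by
    apply List.drop_eq_nil_of_le
    rw [List.length_append, hPlen, List.length_drop]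
    omega
  have hfree : ∀ x ∈ R.drop slow, x ≠ d := by
    intro x hx
    obtain ⟨j, hj, hjx⟩ := List.getElem_of_mem hx
    have hjlen : j < R.length - slow := by
      rw [List.length_drop] at hj
      omega
    have hx2 : x = R[slow + j] := by
      rw [← hjx, List.getElem_drop]
    rw [hx2]
    intro hxd
    apply hnod (slow + j) (by omega) (by omega)
    rw [getD_eq_getElem R (slow + j) ' ' (by omega)]
    exact hxd
  have htk : (R.drop slow).take (R.length - slow) = R.drop slow := by
    rw [show R.length - slow = (R.drop slow).length by rw [List.length_drop], List.take_length]
  have hproc : procRev d R = procRev d (R.take slow) ++ (R.drop slow).reverse := by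
    conv_lhs => rw [← List.take_append_drop slow R]
    rw [procRev_append_boundary d (R.take slow) (R.drop slow) hbound2,
      procRev_free d (R.drop slow) hfree]
  rw [htakeslow, hdropslow, hdropm, htk, hproc]
  simp

theorem loop2_nochange (D : List Char) (R : List Char) (h : ∀ c : Char, [c] ≠ D) :
    ∀ i, i ≤ R.length → (List.range i).foldl (stepR D R.length) (R, 0) = (R, 0) := by
  intro i
  induction i with
  | zero =>
    intro _
    simp
  | succ i ih =>
    intro hi
    rw [List.range_succ, List.foldl_append, ih (by omega)]
    simp only [List.foldl_cons, List.foldl_nil]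
    simp only [stepR]
    rw [if_neg]
    rintro (h1 | h1)
    · omega
    · exact h (R.getD i ' ') h1

-- ---------- assembling the two sides ----------

theorem altB_toList (s delimiter : String) (d : Char) (hd : delimiter.toList = [d]) :
    (reverseWordsWithDelimiter_alt s delimiter).toList =
      List.intercalate [d] (wordsD d s.toList).reverse := by
  have hguard : ¬ PySem.Str.len delimiter ≠ 1 := by
    rw [PySem.Str.len_eq, hd]
    simp
  unfold reverseWordsWithDelimiter_alt
  rw [if_neg hguard]
  have h2 : PySem.Chars.split? s.toList [d] = some (mySplit d s.toList) := by
    rw [PySem.Chars.split?]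
    simp [splitOn_eq_mySplit]
  have h1 := PySem.Str.split?_map s delimiter
  rw [hd, h2] at h1
  rcases hspo : PySem.Str.split? s delimiter with _ | ws
  · rw [hspo] at h1
    simp at h1
  · rw [hspo] at h1
    simp only [Option.map_some, Option.some_inj] at h1
    dsimp only
    simp only [Option.getD_some]
    rw [PySem.Str.toList_join, hd]
    have hfm := @List.filter_map String (List Char) String.toList (fun x => decide (x ≠ [])) ws
    rw [h1] at hfm
    have hcong : ws.filter (fun w => decide (w ≠ "")) =
        ws.filter ((fun x => decide (x ≠ [])) ∘ String.toList) := by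
      apply List.filter_congr
      intro w _
      simp only [Function.comp_apply, decide_eq_decide]
      exact (not_congr String.toList_eq_nil_iff).symm
    have hfilter : (ws.filter (fun w => decide (w ≠ ""))).map String.toList = wordsD d s.toList := by
      rw [hcong, ← hfm]
      rfl
    rw [PySem.Chars.join]
    simp only [List.map_reverse]
    rw [hfilter]

theorem portA_eq (s delimiter : String) (d : Char) (hd : delimiter.toList = [d]) :
    (reverseWordsWithDelimiter s delimiter).toList =
      List.intercalate [d] (wordsD d s.toList).reverse := by
  have hl1 : (List.range s.toList.length).foldl (stepA delimiter.toList) (s.toList, 0) =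
      (compA [d] none s.toList ++ s.toList.drop (compA [d] none s.toList).length,
       (compA [d] none s.toList).length) := by
    have h := loop1_spec delimiter.toList s.toList s.toList.length le_rfl
    rw [List.take_length] at h
    rw [h, hd]
  have hch := compA_characterization d s.toList
  have hKlen : (compA [d] none s.toList).length ≤ s.toList.length :=
    compA_length_le [d] none s.toList
  unfold reverseWordsWithDelimiter
  dsimp only
  rw [hl1]
  dsimp only
  by_cases hK : (compA [d] none s.toList).length = 0
  · rw [if_pos hK]
    have hC0 : compA [d] none s.toList = [] := List.length_eq_zero_iff.mp hK
    have hW0 : wordsD d s.toList = [] := by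
      by_contra hW
      have hne := intercalate_ne_nil d (wordsD d s.toList) hW
        (fun w hw => (wordsD_free d s.toList w hw).1)
      rw [hC0] at hch
      rcases List.append_eq_nil_iff.mp hch.symm with ⟨h1, _⟩
      exact hne h1
    rw [hW0]
    simp [List.intercalate]
  · rw [if_neg hK]
    have hW : wordsD d s.toList ≠ [] := by
      intro hW0
      rw [hW0] at hch
      simp [List.intercalate] at hch
      exact hK (by rw [hch]; rfl)
    have hn1 : 1 ≤ s.toList.length := by omega
    have hcslen : (compA [d] none s.toList ++
        s.toList.drop (compA [d] none s.toList).length).length = s.toList.length := by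
      rw [List.length_append, List.length_drop]
      omega
    have hgetlast : (compA [d] none s.toList ++
        s.toList.drop (compA [d] none s.toList).length).getD (s.toList.length - 1) ' '
        = s.toList.getD (s.toList.length - 1) ' ' := by
      by_cases hKn : (compA [d] none s.toList).length ≤ s.toList.length - 1
      · rw [getD_append_right _ _ _ ' ' hKn, getD_drop, Nat.add_sub_cancel' hKn]
      · have hKfull : (compA [d] none s.toList).length = s.toList.length := by omega
        have hCfull : compA [d] none s.toList = s.toList :=
          compA_eq_of_length [d] none s.toList hKfull
        rw [hCfull, List.drop_length, List.append_nil]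
    rw [hcslen, hgetlast]
    have hgl : s.toList.getLast? = some (s.toList.getD (s.toList.length - 1) ' ') := by
      rw [List.getLast?_eq_getElem?, getD_eq_getElem s.toList _ ' ' (by omega),
        List.getElem?_eq_getElem (by omega)]
    have htrim :
        (if [s.toList.getD (s.toList.length - 1) ' '] = delimiter.toList then
            (compA [d] none s.toList ++
              s.toList.drop (compA [d] none s.toList).length).take
                ((compA [d] none s.toList).length - 1)
          else
            (compA [d] none s.toList ++
              s.toList.drop (compA [d] none s.toList).length).take
                (compA [d] none s.toList).length)
        = List.intercalate [d] (wordsD d s.toList) := by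
      by_cases hend : s.toList.getD (s.toList.length - 1) ' ' = d
      · rw [if_pos (by rw [hd, hend])]
        have hcond : s.toList.getLast? = some d ∧ wordsD d s.toList ≠ [] := by
          refine ⟨?_, hW⟩
          rw [hgl, hend]
        have hCval : compA [d] none s.toList =
            List.intercalate [d] (wordsD d s.toList) ++ [d] := by
          rw [hch, if_pos hcond]
        rw [List.take_append_of_le_length (by omega)]
        rw [hCval]
        rw [show (List.intercalate [d] (wordsD d s.toList) ++ [d]).length - 1
            = (List.intercalate [d] (wordsD d s.toList)).length from by simp]
        rw [List.take_left' rfl]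
      · rw [if_neg (by rw [hd]; simpa using hend)]
        have hcond : ¬ (s.toList.getLast? = some d ∧ wordsD d s.toList ≠ []) := by
          rintro ⟨h1, _⟩
          rw [hgl] at h1
          exact hend (by injection h1)
        have hCval2 : compA [d] none s.toList =
            List.intercalate [d] (wordsD d s.toList) := by
          rw [hch, if_neg hcond, List.append_nil]
        rw [List.take_append_of_le_length (by omega), hCval2, List.take_length]
    rw [htrim, hd, String.toList_ofList,
      loop2_full d (List.intercalate [d] (wordsD d s.toList)).reverse,
      reverse_intercalate d (wordsD d s.toList),
      procRev_intercalate d _ (by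
        intro w' hw' x hx
        obtain ⟨w, hwmem, rfl⟩ := List.mem_map.mp hw'
        have hwW : w ∈ wordsD d s.toList := List.mem_reverse.mp hwmem
        have hnd := (wordsD_free d s.toList w hwW).2
        intro heq
        exact hnd (heq ▸ (List.mem_reverse.mp hx)))]
    simp [List.map_map, Function.comp_def]

theorem portA_id (s delimiter : String) (hd : delimiter.toList.length ≠ 1) :
    reverseWordsWithDelimiter s delimiter = s := by
  have hall : ∀ c : Char, [c] ≠ delimiter.toList := by
    intro c hce
    apply hd
    rw [← hce]
    rfl
  have hcomp : compA delimiter.toList none s.toList = s.toList :=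
    compA_all delimiter.toList hall none s.toList
  have hl1 : (List.range s.toList.length).foldl (stepA delimiter.toList) (s.toList, 0) =
      (compA delimiter.toList none s.toList ++
         s.toList.drop (compA delimiter.toList none s.toList).length,
       (compA delimiter.toList none s.toList).length) := by
    have h := loop1_spec delimiter.toList s.toList s.toList.length le_rfl
    rwa [List.take_length] at h
  unfold reverseWordsWithDelimiter
  dsimp only
  rw [hl1]
  dsimp only
  by_cases h0 : s.toList.length = 0
  · rw [if_pos (show (compA delimiter.toList none s.toList).length = 0 by
      rw [hcomp]; exact h0)]
    have hs : s = "" := by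
      apply String.toList_inj.mp
      simp [List.length_eq_zero_iff.mp h0]
    rw [hs]
  · simp only [hcomp]
    rw [if_neg (by simpa using h0)]
    have hdropnil : s.toList.drop s.toList.length = [] := by simp
    rw [hdropnil, List.append_nil]
    have hgd : [s.toList.getD (s.toList.length - 1) ' '] ≠ delimiter.toList := hall _
    rw [if_neg hgd, List.take_length]
    have hm : (s.toList.reverse).length = s.toList.length := by simp
    rw [List.range_succ, List.foldl_append,
      loop2_nochange delimiter.toList s.toList.reverse hall s.toList.reverse.length le_rfl]
    simp only [List.foldl_cons, List.foldl_nil, stepR]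
    rw [if_pos (Or.inl trivial)]
    apply String.toList_inj.mp
    rw [String.toList_ofList]
    simp
    rw [show s.length = s.toList.reverse.length from by simp, List.take_length]
    simp


-- ===== VERDICT (by name: the statement is the Claim_ definition above) =====
theorem reverseWordsWithDelimiter_spec : Claim_equal_reverseWordsWithDelimiter := by
  intro s delimiter _
  unfold Spec_reverseWordsWithDelimiter
  by_cases h1 : delimiter.toList.length = 1
  · obtain ⟨d, hd⟩ : ∃ d, delimiter.toList = [d] := by
      cases hdl : delimiter.toList with
      | nil => simp [hdl] at h1
      | cons a t => cases t with
        | nil => exact ⟨a, rfl⟩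
        | cons b u => simp [hdl] at h1
    apply String.toList_inj.mp
    rw [portA_eq s delimiter d hd, altB_toList s delimiter d hd]
  · rw [portA_id s delimiter h1]
    unfold reverseWordsWithDelimiter_alt
    rw [if_pos (show PySem.Str.len delimiter ≠ 1 by rw [PySem.Str.len_eq]; exact_mod_cast h1)]
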